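-- pv_equiv track=rewrite | github.com/issdandavis/SCBE-AETHERMOORE | agents/research_agent.py | _extract_relevant_passage
-- ===== SOURCE A (Python) =====
-- def _extract_relevant_passage(text: str, query_terms: set, window: int = 500) -> str:
--     """Extract the most relevant passage from text."""
--     if not text or not query_terms:
--         return text[:window] if text else ""
--
--     text_lower = text.lower()
--     best_pos = 0
--     best_score = 0
--
--     # Sliding window to find densest region of query terms
--     for term in query_terms:
--         pos = text_lower.find(term)
--         while pos != -1:
--             # Count terms in window around this position
--             start = max(0, pos - window // 2)
--             end = min(len(text), pos + window // 2)
--             chunk = text_lower[start:end]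
--             score = sum(1 for t in query_terms if t in chunk)
--             if score > best_score:
--                 best_score = score
--                 best_pos = start
--             pos = text_lower.find(term, pos + 1)
--
--     start = max(0, best_pos)
--     end = min(len(text), start + window)
--
--     # Extend to sentence boundaries
--     while start > 0 and text[start] not in ".!?\n":
--         start -= 1
--     if start > 0:
--         start += 1
--     while end < len(text) and text[end] not in ".!?\n":
--         end += 1
--
--     return text[start:end].strip()
-- ===== SOURCE B (Python) =====
-- def _extract_relevant_passage(text: str, query_terms: set, window: int = 500) -> str:
--     """Extract the most relevant passage from text (occurrence lists + bisection)."""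
--     if not text or not query_terms:
--         return text[:window] if text else ""
--
--     text_lower = text.lower()
--     n = len(text)
--     half = window // 2
--     terms = sorted(query_terms)  # one determinate order for the tie-break
--     # ascending occurrence starts of every term, computed once
--     occs = [[i for i in range(n + 1) if text_lower.startswith(term, i)]
--             for term in terms]
--
--     def covered(term, ps, lo, hi):
--         # does term occur inside text_lower[lo:hi]? ('' is in every slice)
--         if not term:
--             return True
--         a, b = 0, len(ps)
--         while a < b:  # leftmost occurrence >= lo, by bisection
--             m = (a + b) // 2
--             if ps[m] < lo:
--                 a = m + 1
--             else:
--                 b = m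
--         return a < len(ps) and ps[a] + len(term) <= hi
--
--     best_pos = 0
--     best_score = 0
--     for term, ps in zip(terms, occs):
--         for pos in ps:
--             lo = max(0, pos - half)
--             hi = min(n, pos + half)
--             score = sum(1 for t, q in zip(terms, occs) if covered(t, q, lo, hi))
--             if score > best_score:
--                 best_score = score
--                 best_pos = lo
--
--     start = best_pos
--     end = min(n, start + window)
--
--     # Extend to sentence boundaries
--     while start > 0 and text[start] not in ".!?\n":
--         start -= 1
--     if start > 0:
--         start += 1
--     while end < n and text[end] not in ".!?\n":
--         end += 1
--
--     return text[start:end].strip()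
-- ===== Notes on version B (the rewrite author's own statement) =====
-- stated objective: faster
-- what changed: B precomputes each query term's ascending occurrence-position list once and scores every candidate window with a hand-rolled binary search over those lists (iterating terms in sorted order), instead of re-slicing the text and rescanning the whole chunk for every term at every occurrence.
-- outside the precondition, e.g. on _extract_relevant_passage('.a!a!a?.', {'a'}, -6): A returns 'a', B returns '.a'; on _extract_relevant_passage('.!!""!"x \' ', {'"', "'"}, 4): A returns '"x \'', B returns '!""'
import Mathlib
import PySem

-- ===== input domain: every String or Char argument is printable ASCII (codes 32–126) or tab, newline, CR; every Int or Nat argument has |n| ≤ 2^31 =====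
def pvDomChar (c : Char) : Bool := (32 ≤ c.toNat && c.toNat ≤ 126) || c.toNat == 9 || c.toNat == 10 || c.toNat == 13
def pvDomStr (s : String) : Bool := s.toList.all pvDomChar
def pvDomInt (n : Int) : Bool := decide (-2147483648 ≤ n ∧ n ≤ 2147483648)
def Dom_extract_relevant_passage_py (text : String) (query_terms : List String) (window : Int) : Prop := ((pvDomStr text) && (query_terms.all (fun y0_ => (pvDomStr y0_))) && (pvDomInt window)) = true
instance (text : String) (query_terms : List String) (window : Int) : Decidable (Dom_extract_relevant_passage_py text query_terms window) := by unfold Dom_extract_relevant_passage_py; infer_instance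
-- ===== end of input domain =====

-- B precomputes each term's ascending occurrence-position list once and scores candidate
-- windows by bisection over those lists instead of re-slicing the text and rescanning the
-- chunk for every term at every occurrence (objective: faster).

-- ===== SHARED TAIL HELPERS (the sentence-boundary extension loops; Source A and Source B end
-- with the textually identical code, so both ports transliterate it through these) =====

-- while start > 0 and text[start] not in ".!?\n": start -= 1
def pvExtendStart (s : List Char) (start : Int) : Int :=
  if h : 0 < start then
    -- text[start]: in range whenever this branch is reached inside Pre_; the default stops the loop
    let c := PySem.List.pyGetD s start '.'
    if c = '.' ∨ c = '!' ∨ c = '?' ∨ c = '\n' then start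
    else pvExtendStart s (start - 1)
  else start
termination_by start.toNat
decreasing_by omega

-- while end < n and text[end] not in ".!?\n": end += 1
def pvExtendEnd (s : List Char) (n e : Int) : Int :=
  if h : e < n then
    let c := PySem.List.pyGetD s e '.'
    if c = '.' ∨ c = '!' ∨ c = '?' ∨ c = '\n' then e
    else pvExtendEnd s n (e + 1)
  else e
termination_by (n - e).toNat
decreasing_by omega

-- ===== PORT A =====

-- score = sum(1 for t in query_terms if t in chunk)
def pvA_score (terms : List String) (chunk : List Char) : Int :=
  (terms.map (fun t => if PySem.Chars.isIn t.toList chunk then (1 : Int) else 0)).sum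

-- one iteration of A's while body (chunk slice, rescan, best update)
def pvStepA (tl : List Char) (terms : List String) (n w2 : Int) (best : Int × Int) (pos : Int) : Int × Int :=
  let start := max 0 (pos - w2)
  let e := min n (pos + w2)
  let score := pvA_score terms (PySem.List.slice tl (some start) (some e))
  if best.2 < score then (start, score) else best

-- A's 'pos = find(term); while pos != -1: ...; pos = find(term, pos+1)' loop
-- (fuel only makes it total; n+2 always suffices: positions strictly increase and stay ≤ n)
def pvA_findLoop (tl : List Char) (terms : List String) (n w2 : Int) (term : List Char)
    (pos : Int) (best : Int × Int) : Nat → Int × Int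
  | 0 => best
  | fuel + 1 =>
    if pos = -1 then best
    else pvA_findLoop tl terms n w2 term (PySem.Chars.findFrom tl term (pos + 1) none)
          (pvStepA tl terms n w2 best pos) fuel

def extract_relevant_passage_py (text : String) (query_terms : List String) (window : Int) : String :=
  let s := text.toList
  if s = [] ∨ query_terms = [] then
    if s = [] then "" else String.ofList (PySem.List.slice s none (some window))
  else
    let tl := PySem.Chars.lower s
    let w2 := PySem.Int.floordiv window 2
    let best := query_terms.foldl
      (fun best term => pvA_findLoop tl query_terms (s.length : Int) w2 term.toList
        (PySem.Chars.find tl term.toList) best (s.length + 2)) ((0 : Int), (0 : Int))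
    let start := max 0 best.1
    let e := min (s.length : Int) (start + window)
    let start1 := pvExtendStart s start
    let start2 := if 0 < start1 then start1 + 1 else start1
    let e1 := pvExtendEnd s (s.length : Int) e
    String.ofList (PySem.Chars.strip (PySem.List.slice s (some start2) (some e1)))

-- ===== PORT B =====

-- [i for i in range(n + 1) if text_lower.startswith(term, i)]
def pvB_positions (tl t : List Char) : List Int :=
  ((List.range (tl.length + 1)).filter (fun i => PySem.Chars.startswith (tl.drop i) t)).map
    (fun i => Int.ofNat i)

-- the hand-rolled 'leftmost occurrence >= lo' bisection from Source B
def pvB_bisect (ps : List Int) (x a b : Int) : Int :=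
  if h : a < b then
    let m := PySem.Int.floordiv (a + b) 2
    if PySem.List.pyGetD ps m 0 < x then pvB_bisect ps x (m + 1) b
    else pvB_bisect ps x a m
  else a
termination_by (b - a).toNat
decreasing_by
  · have := PySem.Int.floordiv_two_mid_bounds (le_of_lt h)
    omega
  · have := PySem.Int.floordiv_two_mid_bounds (le_of_lt h)
    have hm : PySem.Int.floordiv (a + b) 2 < b := by
      rw [PySem.Int.floordiv_lt_iff_lt_mul (by norm_num)]; omega
    omega

def pvB_covered (t : List Char) (ps : List Int) (lo hi : Int) : Bool :=
  if t = [] then true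
  else
    let a := pvB_bisect ps lo 0 (ps.length : Int)
    decide (a < (ps.length : Int) ∧ PySem.List.pyGetD ps a 0 + (t.length : Int) ≤ hi)

-- score = sum(1 for t, q in zip(terms, occs) if covered(t, q, lo, hi))
def pvB_score (pairs : List (String × List Int)) (lo hi : Int) : Int :=
  (pairs.map (fun tq => if pvB_covered tq.1.toList tq.2 lo hi then (1 : Int) else 0)).sum

-- Source B's inner candidate step
def pvStepB (pairs : List (String × List Int)) (n half : Int) (best : Int × Int) (pos : Int) : Int × Int :=
  let lo := max 0 (pos - half)
  let hi := min n (pos + half)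
  let score := pvB_score pairs lo hi
  if best.2 < score then (lo, score) else best

def extract_relevant_passage_py_alt (text : String) (query_terms : List String) (window : Int) : String :=
  let s := text.toList
  if s = [] ∨ query_terms = [] then
    if s = [] then "" else String.ofList (PySem.List.slice s none (some window))
  else
    let tl := PySem.Chars.lower s
    let half := PySem.Int.floordiv window 2
    let terms := PySem.List.sorted query_terms (fun t => t)
    let occs := terms.map (fun t => pvB_positions tl t.toList)
    let pairs := terms.zip occs
    let best := pairs.foldl
      (fun best tq => tq.2.foldl (pvStepB pairs (s.length : Int) half) best) ((0 : Int), (0 : Int))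
    let start := best.1
    let e := min (s.length : Int) (start + window)
    let start1 := pvExtendStart s start
    let start2 := if 0 < start1 then start1 + 1 else start1
    let e1 := pvExtendEnd s (s.length : Int) e
    String.ofList (PySem.Chars.strip (PySem.List.slice s (some start2) (some e1)))

-- ===== PRECONDITION & SPEC =====

-- Pre_ excludes (a) negative window with nonempty text and terms — outside the function's
-- natural domain: A there either raises IndexError or assembles its result through Python's
-- negative slice/index wraparound — and (b) query-term lists that are not strictly sorted:
-- the list stands for a Python set, whose iteration order is not part of the value, so the
-- claim is stated for the canonical (sorted, duplicate-free) representative.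
def Pre_extract_relevant_passage_py (text : String) (query_terms : List String) (window : Int) : Prop :=
  List.Pairwise (fun a b : String => a.toList < b.toList) query_terms ∧
    (text = "" ∨ query_terms = [] ∨ 0 ≤ window)

instance (text : String) (query_terms : List String) (window : Int) :
    Decidable (Pre_extract_relevant_passage_py text query_terms window) := by
  unfold Pre_extract_relevant_passage_py; infer_instance

def pvWitness_extract_relevant_passage_py : String × List String × Int :=
  ("The cat ran. A dog slept. The cat and dog met.", ["cat", "dog"], 12)

def Spec_extract_relevant_passage_py (text : String) (query_terms : List String) (window : Int) (out : String) : Prop := out = extract_relevant_passage_py_alt text query_terms window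
instance (text : String) (query_terms : List String) (window : Int) (out : String) : Decidable (Spec_extract_relevant_passage_py text query_terms window out) := by unfold Spec_extract_relevant_passage_py; infer_instance

-- ===== CLAIM (what is proved, stated in full; the proofs are below) =====
def Claim_equal_extract_relevant_passage_py : Prop := ∀ (text : String) (query_terms : List String) (window : Int), Dom_extract_relevant_passage_py text query_terms window → Pre_extract_relevant_passage_py text query_terms window → Spec_extract_relevant_passage_py text query_terms window (extract_relevant_passage_py text query_terms window)


-- ===== LEMMAS AND PROOFS =====

theorem pv_mem_positions (tl t : List Char) (q : Int) :
    q ∈ pvB_positions tl t ↔ ∃ i : Nat, q = (i : Int) ∧ i ≤ tl.length ∧ t <+: tl.drop i := by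
  simp only [pvB_positions, List.mem_map, List.mem_filter, List.mem_range,
    PySem.Chars.startswith_iff]
  constructor
  · rintro ⟨i, ⟨hi, hp⟩, rfl⟩; exact ⟨i, rfl, by omega, hp⟩
  · rintro ⟨i, rfl, hi, hp⟩; exact ⟨i, ⟨by omega, hp⟩, rfl⟩

theorem pv_positions_sorted (tl t : List Char) :
    List.Pairwise (fun a b : Int => a < b) (pvB_positions tl t) := by
  rw [pvB_positions]
  exact List.Pairwise.map (R := (· < ·)) _ (fun a b h => Int.ofNat_lt.mpr h)
    (List.Pairwise.filter _ List.pairwise_lt_range)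

theorem pv_isIn_slice_iff (tl t : List Char) (a b : Nat) (ht : t ≠ []) :
    (PySem.Chars.isIn t (PySem.List.slice tl (some (a : Int)) (some (b : Int))) = true) ↔
      ∃ i : Nat, a ≤ i ∧ i + t.length ≤ b ∧ t <+: tl.drop i := by
  have htl : 0 < t.length := List.length_pos_iff.2 ht
  rw [PySem.List.slice_natCast, ← PySem.Chars.exists_prefix_drop_iff_isIn]
  constructor
  · rintro ⟨j, hj⟩
    rw [List.drop_take, List.drop_drop, List.prefix_take_iff] at hj
    exact ⟨a + j, by omega, by omega, hj.1⟩
  · rintro ⟨i, hai, hfit, hp⟩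
    refine ⟨i - a, ?_⟩
    rw [List.drop_take, List.drop_drop, List.prefix_take_iff]
    constructor
    · have : a + (i - a) = i := by omega
      rw [this]; exact hp
    · omega

theorem pv_bisect_inv (ps : List Int) (x : Int)
    (hs : List.Pairwise (fun a b : Int => a < b) ps) :
    ∀ (a b : Int), 0 ≤ a → a ≤ b → b ≤ (ps.length : Int) →
    (∀ (i : Nat) (h : i < ps.length), (i : Int) < a → ps[i] < x) →
    (∀ (i : Nat) (h : i < ps.length), b ≤ (i : Int) → x ≤ ps[i]) →
    (a ≤ pvB_bisect ps x a b ∧ pvB_bisect ps x a b ≤ b ∧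
      (∀ (i : Nat) (h : i < ps.length), (i : Int) < pvB_bisect ps x a b → ps[i] < x) ∧
      (∀ (i : Nat) (h : i < ps.length), pvB_bisect ps x a b ≤ (i : Int) → x ≤ ps[i])) := by
  intro a b
  induction a, b using pvB_bisect.induct ps x with
  | case1 a b hab m hlt ih =>
    intro ha0 hab' hbl hlo hhi
    rw [pvB_bisect, dif_pos hab, if_pos hlt]
    have hmb := PySem.Int.floordiv_two_mid_bounds (le_of_lt hab)
    have hmltb : PySem.Int.floordiv (a + b) 2 < b := by
      rw [PySem.Int.floordiv_lt_iff_lt_mul (by norm_num)]; omega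
    have hm0 : (0:Int) ≤ m := by simp only [m]; omega
    have hmlen : m < (ps.length : Int) := by simp only [m]; omega
    have hmget : PySem.List.pyGetD ps m 0 = ps[m.toNat]'(by omega) :=
      PySem.List.pyGetD_eq_getElem ps 0 hm0 hmlen
    have hnew : ∀ (i : Nat) (h : i < ps.length), (i : Int) < m + 1 → ps[i] < x := by
      intro i hi hilt
      rcases lt_or_eq_of_le (show i ≤ m.toNat by omega) with hc | hc
      · have := List.pairwise_iff_getElem.1 hs i m.toNat hi (by omega) hc
        rw [hmget] at hlt; omega
      · subst hc; rw [hmget] at hlt; exact hlt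
    obtain ⟨h1, h2, h3, h4⟩ := ih (by omega) (by simp only [m] at *; omega) hbl hnew hhi
    refine ⟨by simp only [m] at *; omega, h2, h3, h4⟩
  | case2 a b hab m hge ih =>
    intro ha0 hab' hbl hlo hhi
    rw [pvB_bisect, dif_pos hab, if_neg hge]
    have hmb := PySem.Int.floordiv_two_mid_bounds (le_of_lt hab)
    have hm0 : (0:Int) ≤ m := by simp only [m]; omega
    have hmlen : m < (ps.length : Int) := by
      have : PySem.Int.floordiv (a + b) 2 < b := by
        rw [PySem.Int.floordiv_lt_iff_lt_mul (by norm_num)]; omega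
      simp only [m]; omega
    have hmget : PySem.List.pyGetD ps m 0 = ps[m.toNat]'(by omega) :=
      PySem.List.pyGetD_eq_getElem ps 0 hm0 hmlen
    have hnew : ∀ (i : Nat) (h : i < ps.length), m ≤ (i : Int) → x ≤ ps[i] := by
      intro i hi hile
      rw [hmget] at hge
      rcases lt_or_eq_of_le (show m.toNat ≤ i by omega) with hc | hc
      · have := List.pairwise_iff_getElem.1 hs m.toNat i (by omega) hi hc
        omega
      · subst hc; omega
    obtain ⟨h1, h2, h3, h4⟩ := ih ha0 (by simp only [m] at *; omega) (by omega) hlo hnew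
    refine ⟨h1, by simp only [m] at *; omega, h3, h4⟩
  | case3 a b hab =>
    intro ha0 hab' hbl hlo hhi
    rw [pvB_bisect, dif_neg hab]
    exact ⟨le_refl a, by omega, fun i hi hlt => hlo i hi hlt, fun i hi hle => hhi i hi (by omega)⟩

theorem pv_covered_iff (t : List Char) (ps : List Int) (lo hi : Int)
    (hs : List.Pairwise (fun a b : Int => a < b) ps) (ht : t ≠ []) :
    (pvB_covered t ps lo hi = true ↔ ∃ q ∈ ps, lo ≤ q ∧ q + (t.length : Int) ≤ hi) := by
  rw [pvB_covered, if_neg ht]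
  obtain ⟨hr0, hrl, hbelow, habove⟩ :=
    pv_bisect_inv ps lo hs 0 (ps.length : Int) le_rfl (by positivity) le_rfl
      (fun i hi h => absurd h (by omega)) (fun i hi h => absurd h (by omega))
  set r := pvB_bisect ps lo 0 (ps.length : Int) with hr
  simp only [decide_eq_true_eq]
  constructor
  · rintro ⟨hrlt, hfit⟩
    have hlt : r.toNat < ps.length := by omega
    have hget : PySem.List.pyGetD ps r 0 = ps[r.toNat] :=
      PySem.List.pyGetD_eq_getElem ps 0 (by omega) (by omega)
    exact ⟨ps[r.toNat], List.getElem_mem _, habove r.toNat hlt (by omega), by omega⟩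
  · rintro ⟨q, hq, hloq, hfit⟩
    obtain ⟨j, hj, rfl⟩ := List.getElem_of_mem hq
    have hjr : r ≤ (j : Int) := by
      by_contra hlt
      exact absurd (hbelow j hj (by omega)) (by omega)
    have hrlt : r < (ps.length : Int) := by omega
    have hrn : r.toNat < ps.length := by omega
    have hle : ps[r.toNat] ≤ ps[j] := by
      rcases lt_or_eq_of_le (show r.toNat ≤ j by omega) with h | h
      · exact le_of_lt (List.pairwise_iff_getElem.1 hs r.toNat j hrn hj h)
      · subst h; exact le_refl _
    have hget : PySem.List.pyGetD ps r 0 = ps[r.toNat] :=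
      PySem.List.pyGetD_eq_getElem ps 0 (by omega) (by omega)
    exact ⟨hrlt, by omega⟩

theorem pv_score_eq (tl : List Char) (terms : List String) (lo hi : Int)
    (h0 : 0 ≤ lo) (hlh : lo ≤ hi) (hhn : hi ≤ (tl.length : Int)) :
    pvA_score terms (PySem.List.slice tl (some lo) (some hi)) =
      pvB_score (terms.map (fun t => (t, pvB_positions tl t.toList))) lo hi := by
  rw [pvA_score, pvB_score, List.map_map]
  congr 1
  apply List.map_congr_left
  intro t _
  simp only [Function.comp]
  congr 1
  by_cases ht : t.toList = []
  · rw [ht, PySem.Chars.isIn_nil, pvB_covered, if_pos rfl]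
  · have hiff1 := pv_isIn_slice_iff tl t.toList lo.toNat hi.toNat ht
    have hiff2 := pv_covered_iff t.toList (pvB_positions tl t.toList) lo hi
      (pv_positions_sorted tl t.toList) ht
    have hcast : (PySem.List.slice tl (some ((lo.toNat : Nat) : Int)) (some ((hi.toNat : Nat) : Int)))
        = PySem.List.slice tl (some lo) (some hi) := by
      congr 1 <;> · congr 1; omega
    rw [hcast] at hiff1
    have htl : 0 < t.toList.length := List.length_pos_iff.2 ht
    have : PySem.Chars.isIn t.toList (PySem.List.slice tl (some lo) (some hi)) =
        pvB_covered t.toList (pvB_positions tl t.toList) lo hi := by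
      rcases Bool.eq_false_or_eq_true (PySem.Chars.isIn t.toList (PySem.List.slice tl (some lo) (some hi))) with hb | hb <;> rw [hb]
      · symm
        rw [hiff2]
        obtain ⟨i, hai, hfit, hp⟩ := hiff1.1 hb
        refine ⟨(i : Int), (pv_mem_positions tl t.toList _).2 ⟨i, rfl, by omega, hp⟩, by omega, by omega⟩
      · symm
        rw [← Bool.not_eq_true] at hb ⊢
        intro hcov
        apply hb
        rw [hiff1]
        obtain ⟨q, hq, hloq, hfit⟩ := hiff2.1 hcov
        obtain ⟨i, rfl, hile, hp⟩ := (pv_mem_positions tl t.toList _).1 hq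
        exact ⟨i, by omega, by omega, hp⟩
    rw [this]

theorem pv_findFrom_past (tl term : List Char) (k : Int) (h : (tl.length : Int) < k) :
    PySem.Chars.findFrom tl term k none = -1 := by
  simp only [PySem.Chars.findFrom]
  rw [if_neg (show ¬ k < 0 by omega), if_pos h]

theorem pv_filter_ge_nil (ps : List Int) (k : Int) (h : ∀ q ∈ ps, ¬ k ≤ q) :
    ps.filter (fun q => decide (k ≤ q)) = [] := by
  rw [List.filter_eq_nil_iff]
  intro q hq
  simpa using h q hq

theorem pv_filter_ge_decomp (ps : List Int) (k q0 : Int)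
    (hs : List.Pairwise (fun a b : Int => a < b) ps)
    (hq0 : q0 ∈ ps) (hk : k ≤ q0) (hmin : ∀ q ∈ ps, k ≤ q → q0 ≤ q) :
    ps.filter (fun q => decide (k ≤ q)) = q0 :: ps.filter (fun q => decide (q0 + 1 ≤ q)) := by
  induction ps with
  | nil => cases hq0
  | cons h t ih =>
    rcases List.mem_cons.1 hq0 with rfl | hq0t
    · rw [List.filter_cons_of_pos (by simpa using hk),
        List.filter_cons_of_neg (by simp)]
      congr 1
      apply List.filter_congr
      intro q hq
      have : q0 < q := (List.pairwise_cons.1 hs).1 q hq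
      simp only [decide_eq_decide]
      omega
    · have hhk : ¬ k ≤ h := by
        intro hkh
        have := hmin h (List.mem_cons_self) hkh
        have : h < q0 := (List.pairwise_cons.1 hs).1 q0 hq0t
        omega
      rw [List.filter_cons_of_neg (by simpa using hhk),
        List.filter_cons_of_neg (by simp; omega)]
      exact ih (List.pairwise_cons.1 hs).2 hq0t
        (fun q hq hkq => hmin q (List.mem_cons_of_mem _ hq) hkq)

theorem pv_findLoop_eq (tl : List Char) (terms : List String) (w2 : Int) (term : List Char) :
    ∀ (fuel : Nat) (k : Nat) (best : Int × Int),
    k ≤ tl.length + 1 →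
    ((pvB_positions tl term).filter (fun q => decide ((k : Int) ≤ q))).length < fuel →
    pvA_findLoop tl terms (tl.length : Int) w2 term (PySem.Chars.findFrom tl term (k : Int) none) best fuel
      = ((pvB_positions tl term).filter (fun q => decide ((k : Int) ≤ q))).foldl
          (pvStepA tl terms (tl.length : Int) w2) best := by
  intro fuel
  induction fuel with
  | zero => intro k best _ hf; omega
  | succ fuel ih =>
    intro k best hk hf
    by_cases hkn : k ≤ tl.length
    · by_cases hneg : PySem.Chars.findFrom tl term (k : Int) none = -1
      · have hnil : (pvB_positions tl term).filter (fun q => decide ((k : Int) ≤ q)) = [] := by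
          apply pv_filter_ge_nil
          intro q hq hkq
          obtain ⟨i, rfl, hile, hp⟩ := (pv_mem_positions tl term q).1 hq
          rw [PySem.Chars.findFrom_natCast_eq_neg_one_iff tl term k hkn] at hneg
          apply hneg
          have : term <+: (tl.drop k).drop (i - k) := by
            rw [List.drop_drop]
            have : k + (i - k) = i := by omega
            rw [this]; exact hp
          exact List.infix_iff_prefix_suffix.2 ⟨_, this, List.drop_suffix _ _⟩
        rw [hnil, hneg]
        simp [pvA_findLoop]
      · obtain ⟨hkv, hpv, hminv⟩ := PySem.Chars.findFrom_natCast_spec tl term k hkn hneg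
        set v := PySem.Chars.findFrom tl term (k : Int) none with hv
        have hv0 : 0 ≤ v := le_trans (by omega) hkv
        have hvn : v.toNat ≤ tl.length := by
          by_cases hterm : term = []
          · by_contra hgt
            refine hminv tl.length hkn (by omega) ?_
            rw [hterm]
            exact List.nil_prefix
          · have hlen := hpv.length_le
            rw [List.length_drop] at hlen
            have : 0 < term.length := List.length_pos_iff.2 hterm
            omega
        have hmem : v ∈ pvB_positions tl term := by
          apply (pv_mem_positions tl term v).2
          exact ⟨v.toNat, by omega, hvn, hpv⟩
        have hdec : (pvB_positions tl term).filter (fun q => decide ((k : Int) ≤ q))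
            = v :: (pvB_positions tl term).filter (fun q => decide ((v + 1 : Int) ≤ q)) := by
          apply pv_filter_ge_decomp _ _ _ (pv_positions_sorted tl term) hmem hkv
          intro q hq hkq
          obtain ⟨i, rfl, hile, hp⟩ := (pv_mem_positions tl term q).1 hq
          by_contra hlt
          exact hminv i (by omega) (by omega) hp
        have hcast : (v + 1 : Int) = ((v.toNat + 1 : Nat) : Int) := by omega
        rw [hdec] at hf ⊢
        simp only [List.foldl_cons]
        rw [show pvA_findLoop tl terms (tl.length : Int) w2 term v best (fuel + 1)
            = pvA_findLoop tl terms (tl.length : Int) w2 term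
                (PySem.Chars.findFrom tl term (v + 1) none) (pvStepA tl terms (tl.length : Int) w2 best v) fuel by
          rw [pvA_findLoop]; rw [if_neg hneg]]
        rw [hcast] at hf ⊢
        exact ih (v.toNat + 1) _ (by omega) (by simpa using hf)
    · have hkn1 : k = tl.length + 1 := by omega
      have hpast : PySem.Chars.findFrom tl term (k : Int) none = -1 :=
        pv_findFrom_past tl term _ (by omega)
      have hnil : (pvB_positions tl term).filter (fun q => decide ((k : Int) ≤ q)) = [] := by
        apply pv_filter_ge_nil
        intro q hq hkq
        obtain ⟨i, rfl, hile, hp⟩ := (pv_mem_positions tl term q).1 hq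
        omega
      rw [hnil, hpast]
      simp [pvA_findLoop]

theorem pv_sorted_id (q : List String) (h : List.Pairwise (fun a b : String => a < b) q) :
    PySem.List.sorted q (fun t => t) = q :=
  PySem.List.sorted_eq_of_perm_of_pairwise_lt q q _ (List.Perm.refl q) h

theorem pv_filter_ge_zero (tl term : List Char) :
    (pvB_positions tl term).filter (fun q => decide ((0 : Int) ≤ q)) = pvB_positions tl term := by
  rw [List.filter_eq_self]
  intro q hq
  obtain ⟨i, rfl, _, _⟩ := (pv_mem_positions tl term q).1 hq
  simp

theorem pv_positions_len (tl term : List Char) :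
    (pvB_positions tl term).length ≤ tl.length + 1 := by
  unfold pvB_positions
  rw [List.length_map]
  calc (List.filter _ (List.range (tl.length + 1))).length
      ≤ (List.range (tl.length + 1)).length := List.length_filter_le _ _
    _ = tl.length + 1 := List.length_range

theorem pv_stepB_nonneg (pairs : List (String × List Int)) (n half : Int)
    (ps : List Int) (best : Int × Int) (h : 0 ≤ best.1) :
    0 ≤ (ps.foldl (pvStepB pairs n half) best).1 := by
  induction ps generalizing best with
  | nil => exact h
  | cons p t ih =>
    rw [List.foldl_cons]
    apply ih
    rw [pvStepB]
    split
    · exact le_max_left _ _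
    · exact h

theorem pv_best_nonneg (pairs : List (String × List Int)) (n half : Int)
    (l : List (String × List Int)) (best : Int × Int) (h : 0 ≤ best.1) :
    0 ≤ (l.foldl (fun best tq => tq.2.foldl (pvStepB pairs n half) best) best).1 := by
  induction l generalizing best with
  | nil => exact h
  | cons p t ih =>
    rw [List.foldl_cons]
    exact ih _ (pv_stepB_nonneg pairs n half p.2 best h)

theorem pv_step_eq (tl : List Char) (q : List String) (w2 : Int) (hw2 : 0 ≤ w2)
    (best : Int × Int) (pos : Int) (h0 : 0 ≤ pos) (hn : pos ≤ (tl.length : Int)) :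
    pvStepA tl q (tl.length : Int) w2 best pos
      = pvStepB (q.map (fun t => (t, pvB_positions tl t.toList))) (tl.length : Int) w2 best pos := by
  rw [pvStepA, pvStepB]
  rw [pv_score_eq tl q (max 0 (pos - w2)) (min (tl.length : Int) (pos + w2))
    (le_max_left _ _) (by omega) (by omega)]

theorem pv_zip_map (q : List String) (g : String → List Int) :
    q.zip (q.map g) = q.map (fun t => (t, g t)) := by
  induction q with
  | nil => rfl
  | cons h t ih => simp only [List.map_cons, List.zip_cons_cons, ih]

theorem pv_main (text : String) (q : List String) (w : Int)
    (hsort : List.Pairwise (fun a b : String => a < b) q)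
    (hpre2 : text = "" ∨ q = [] ∨ 0 ≤ w) :
    extract_relevant_passage_py text q w = extract_relevant_passage_py_alt text q w := by
  by_cases hbr : text.toList = [] ∨ q = []
  · simp only [extract_relevant_passage_py, extract_relevant_passage_py_alt]
    rw [if_pos hbr, if_pos hbr]
  · rw [not_or] at hbr
    have htext : ¬ text = "" := by
      intro h; exact hbr.1 (by rw [h]; rfl)
    have hw : 0 ≤ w := by tauto
    have hw2 : 0 ≤ PySem.Int.floordiv w 2 := by
      rw [PySem.Int.floordiv_eq_ediv_of_pos (by norm_num)]
      exact Int.ediv_nonneg hw (by norm_num)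
    simp only [extract_relevant_passage_py, extract_relevant_passage_py_alt]
    simp only [if_neg (show ¬ (text.toList = [] ∨ q = []) from by tauto)]
    rw [pv_sorted_id q hsort, pv_zip_map]
    set s := text.toList with hs
    set tl := PySem.Chars.lower s with htl
    have hlen : tl.length = s.length := by simp [htl, PySem.Chars.lower]
    have hlen' : (s.length : Int) = (tl.length : Int) := by rw [hlen]
    set w2 := PySem.Int.floordiv w 2 with hw2def
    set pairs := q.map (fun t => (t, pvB_positions tl t.toList)) with hpairs
    have hbest :
        q.foldl (fun best term => pvA_findLoop tl q (s.length : Int) w2 term.toList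
            (PySem.Chars.find tl term.toList) best (s.length + 2)) ((0 : Int), (0 : Int))
          = pairs.foldl (fun best tq => tq.2.foldl (pvStepB pairs (s.length : Int) w2) best)
              ((0 : Int), (0 : Int)) := by
      rw [hpairs, List.foldl_map]
      apply PySem.List.foldl_congr_mem
      intro best term _
      have hloop := pv_findLoop_eq tl q w2 term.toList (s.length + 2) 0 best
        (by omega)
        (by
          simp only [Nat.cast_zero, pv_filter_ge_zero]
          have := pv_positions_len tl term.toList
          omega)
      rw [Nat.cast_zero, PySem.Chars.findFrom_zero, pv_filter_ge_zero] at hloop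
      rw [hlen']
      rw [hloop]
      apply PySem.List.foldl_congr_mem
      intro acc pos hpos
      obtain ⟨i, rfl, hile, _⟩ := (pv_mem_positions tl term.toList pos).1 hpos
      rw [pv_step_eq tl q w2 hw2 acc _ (by omega) (by omega)]
    rw [hbest]
    have hnn : 0 ≤ (pairs.foldl (fun best tq => tq.2.foldl (pvStepB pairs (s.length : Int) w2) best)
        ((0 : Int), (0 : Int))).1 := pv_best_nonneg _ _ _ _ _ le_rfl
    rw [max_eq_right hnn]

-- ===== VERDICT (by name: the statement is the Claim_ definition above) =====
theorem extract_relevant_passage_py_spec : Claim_equal_extract_relevant_passage_py := by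
  intro text query_terms window _hdom hpre
  exact pv_main text query_terms window
    (hpre.1.imp (fun h => String.lt_iff_toList_lt.2 h)) hpre.2
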